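-- pv_equiv track=rewrite | github.com/UkaszSierak/Segregation | testowanie.py | concat_position
-- ===== SOURCE A (Python) =====
-- def concat_position(pos_list: list, container_list: dict, message: str):
--
--     def extract_header(offset):
--         return '1;1;EDATA{}'.format(offset)
--
--     def defin_position(position):
--         return ' DEF POS P{}'.format(position)
--
--     def declare_position(position, value):
--          return ' P{}={}(0,0)'.format(position, value)
--
--     def define_flag(position):
--         return  ' DEF INTE M{}'.format(position)
--
--     def declare_flag(position):
--         return  ' M{}=0'.format(position)
--
--     def finish_record():
--         return '\r\n'
--
--     containers = []
--
--     for i, item in enumerate(pos_list):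
--
--         position = i +1
--         value = item.get('location')
--         container = item.get('container')
--         if container not in containers:
--             containers.append(container)
--
--         offset = 10 * (i * 2 + 1)
--         next_offset = 10 * (i * 2 + 2)
--
--         message += extract_header(offset) + defin_position(position) + finish_record()
--         message += extract_header(next_offset) + declare_position(position, value) + finish_record()
--
--     for i, item in enumerate(containers):
--
--         offset = 10 * (position * 2 + 1)
--         next_offset = 10 * (position * 2 + 2)
--
--         position  = position + 1
--         value = container_list.get(item)
--
--         message += extract_header(offset) + defin_position(position) + finish_record()
--         message += extract_header(next_offset) + declare_position(position, value) + finish_record()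
--
--     for i, item in enumerate(containers):
--
--         offset = 10 * (position * 2 + 1)
--         next_offset = 10 * (position * 2 + 2)
--
--         position -= 1
--
--         value = container_list.get(item)
--
--         message += extract_header(offset) + define_flag(position) + finish_record()
--         message += extract_header(next_offset) + declare_flag(position) + finish_record()
--
--         position += 2
--
--     return  message
-- ===== SOURCE B (Python) =====
-- def concat_position(pos_list: list, container_list: dict, message: str):
--     # ordered, deduplicated container values
--     seen = {}
--     for item in pos_list:
--         seen.setdefault(item.get('container'))
--     containers = list(seen)
--     n, m = len(pos_list), len(containers)
--
--     # The whole output is a flat sequence of 2*(n + 2*m) numbered lines; the k-th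
--     # line is decoded arithmetically from k instead of being produced by loops
--     # that mutate a shared position counter.
--     def line(k):
--         i, r = divmod(k, 2)           # record index / define-vs-declare flag
--         if i < n:                     # position records
--             body = 'DEF POS P{}'.format(i + 1) if r == 0 else \
--                    'P{}={}(0,0)'.format(i + 1, pos_list[i].get('location'))
--         elif i < n + m:               # container records
--             body = 'DEF POS P{}'.format(i + 1) if r == 0 else \
--                    'P{}={}(0,0)'.format(i + 1, container_list.get(containers[i - n]))
--         else:                         # flag records
--             j = i - n - m
--             body = 'DEF INTE M{}'.format(n + m - 1 + j) if r == 0 else \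
--                    'M{}=0'.format(n + m - 1 + j)
--         return '1;1;EDATA{} {}\r\n'.format(10 * (k + 1), body)
--
--     return message + ''.join(line(k) for k in range(2 * (n + 2 * m)))
-- ===== Notes on version B (the rewrite author's own statement) =====
-- stated objective: alternative
-- what changed: Instead of A's three loops that mutate a shared position counter (with pre/post-increment offset quirks), B decodes each output line arithmetically from a flat line index k (divmod picks the record and the define/declare half, the segment and label follow from k against n and the dedup count m) and joins the lines in one uniform pass.
import Mathlib
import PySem

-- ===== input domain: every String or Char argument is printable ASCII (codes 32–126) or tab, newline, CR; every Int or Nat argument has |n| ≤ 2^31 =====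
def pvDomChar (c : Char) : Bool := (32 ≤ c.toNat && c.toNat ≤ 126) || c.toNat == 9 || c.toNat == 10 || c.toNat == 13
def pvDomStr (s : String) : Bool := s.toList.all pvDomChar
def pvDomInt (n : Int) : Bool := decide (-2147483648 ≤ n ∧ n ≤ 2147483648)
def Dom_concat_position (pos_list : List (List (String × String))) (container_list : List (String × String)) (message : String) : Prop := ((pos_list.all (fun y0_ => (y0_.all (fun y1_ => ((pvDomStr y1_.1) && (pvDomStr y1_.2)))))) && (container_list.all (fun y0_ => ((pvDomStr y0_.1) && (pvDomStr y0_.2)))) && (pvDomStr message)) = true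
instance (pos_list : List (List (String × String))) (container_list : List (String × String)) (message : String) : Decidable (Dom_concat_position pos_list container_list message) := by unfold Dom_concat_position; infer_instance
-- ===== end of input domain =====

-- B replaces A's three loops mutating a shared position counter by arithmetic decoding of a
-- flat line index: the k-th output line is computed directly from k (segment, record label,
-- offset 10*(k+1)) and the lines are joined in one pass (objective: alternative decomposition).

-- ===== PORT A =====

-- d.get(k) on a Python dict passed as an association list (duplicate keys: last value wins, as in dict(pairs))
def pvGet (d : List (String × String)) (k : String) : Option String :=
  (PySem.Dict.ofList d).get? k

-- '{}'.format(v) where v is a str-or-None: None prints as "None"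
def pvFmt : Option String → String
  | some s => s
  | none => "None"

-- container_list.get(item) where the key 'item' may be None (then Python's .get returns None)
def pvGetK (container_list : List (String × String)) : Option String → Option String
  | some s => pvGet container_list s
  | none => none

-- A's first loop: 'for i, item in enumerate(pos_list)', state (containers, message, position)
def aLoop1 : List (List (String × String)) → Int → List (Option String) → String → Int →
    List (Option String) × String × Int
  | [], _, containers, msg, position => (containers, msg, position)
  | item :: rest, i, containers, msg, _ =>
    let position : Int := i + 1
    let value := pvGet item "location"
    let container := pvGet item "container"
    let containers := if containers.contains container then containers else containers ++ [container]
    let offset : Int := 10 * (i * 2 + 1)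
    let next_offset : Int := 10 * (i * 2 + 2)
    let msg := msg ++ ("1;1;EDATA" ++ PySem.Int.toStr offset) ++ (" DEF POS P" ++ PySem.Int.toStr position) ++ "\r\n"
    let msg := msg ++ ("1;1;EDATA" ++ PySem.Int.toStr next_offset) ++ (" P" ++ PySem.Int.toStr position ++ "=" ++ pvFmt value ++ "(0,0)") ++ "\r\n"
    aLoop1 rest (i + 1) containers msg position

-- A's second loop: 'for i, item in enumerate(containers)' (offset uses position BEFORE the increment)
def aLoop2 (container_list : List (String × String)) : List (Option String) → String → Int → String × Int
  | [], msg, position => (msg, position)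
  | item :: rest, msg, position0 =>
    let offset : Int := 10 * (position0 * 2 + 1)
    let next_offset : Int := 10 * (position0 * 2 + 2)
    let position : Int := position0 + 1
    let value := pvGetK container_list item
    let msg := msg ++ ("1;1;EDATA" ++ PySem.Int.toStr offset) ++ (" DEF POS P" ++ PySem.Int.toStr position) ++ "\r\n"
    let msg := msg ++ ("1;1;EDATA" ++ PySem.Int.toStr next_offset) ++ (" P" ++ PySem.Int.toStr position ++ "=" ++ pvFmt value ++ "(0,0)") ++ "\r\n"
    aLoop2 container_list rest msg position

-- A's third loop: 'position -= 1 … position += 2'; 'value' is computed and unused, as in A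
def aLoop3 (container_list : List (String × String)) : List (Option String) → String → Int → String × Int
  | [], msg, position => (msg, position)
  | item :: rest, msg, position0 =>
    let offset : Int := 10 * (position0 * 2 + 1)
    let next_offset : Int := 10 * (position0 * 2 + 2)
    let position : Int := position0 - 1
    let _value := pvGetK container_list item
    let msg := msg ++ ("1;1;EDATA" ++ PySem.Int.toStr offset) ++ (" DEF INTE M" ++ PySem.Int.toStr position) ++ "\r\n"
    let msg := msg ++ ("1;1;EDATA" ++ PySem.Int.toStr next_offset) ++ (" M" ++ PySem.Int.toStr position ++ "=0") ++ "\r\n"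
    aLoop3 container_list rest msg (position + 2)

def concat_position (pos_list : List (List (String × String))) (container_list : List (String × String)) (message : String) : String :=
  -- Python's 'position' is unassigned before loop 1; the initial 0 is a dummy never read
  -- (loops 2–3 iterate over 'containers', which is nonempty only if loop 1 ran).
  let r1 := aLoop1 pos_list 0 [] message 0
  let r2 := aLoop2 container_list r1.1 r1.2.1 r1.2.2
  (aLoop3 container_list r1.1 r2.1 r2.2).1

-- ===== PORT B =====

-- Source B's 'line(k)': arithmetic decoding of the line index k.
-- pos_list[i] and containers[i-n] are ported with pyGetD: inside B the index is always in
-- range (k < 2*(n+2*m)), so the default is never read where Python would raise.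
def bLine (pos_list : List (List (String × String))) (containers : List (Option String))
    (container_list : List (String × String)) (n m : Int) (k : Int) : String :=
  let i := PySem.Int.floordiv k 2
  let r := PySem.Int.mod k 2
  let body :=
    if i < n then
      if r = 0 then "DEF POS P" ++ PySem.Int.toStr (i + 1)
      else "P" ++ PySem.Int.toStr (i + 1) ++ "=" ++
        pvFmt (pvGet (PySem.List.pyGetD pos_list i []) "location") ++ "(0,0)"
    else if i < n + m then
      if r = 0 then "DEF POS P" ++ PySem.Int.toStr (i + 1)
      else "P" ++ PySem.Int.toStr (i + 1) ++ "=" ++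
        pvFmt (pvGetK container_list (PySem.List.pyGetD containers (i - n) none)) ++ "(0,0)"
    else
      let j := i - n - m
      if r = 0 then "DEF INTE M" ++ PySem.Int.toStr (n + m - 1 + j)
      else "M" ++ PySem.Int.toStr (n + m - 1 + j) ++ "=0"
  "1;1;EDATA" ++ PySem.Int.toStr (10 * (k + 1)) ++ " " ++ body ++ "\r\n"

def concat_position_alt (pos_list : List (List (String × String))) (container_list : List (String × String)) (message : String) : String :=
  -- 'seen.setdefault' dedup loop = the ordered-set fold
  let containers := pos_list.foldl (fun s item => PySem.Set.add s (pvGet item "container")) []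
  let n : Int := pos_list.length
  let m : Int := containers.length
  message ++ PySem.Str.join ""
    ((PySem.List.pyRange 0 (2 * (n + 2 * m)) 1).map (bLine pos_list containers container_list n m))

-- ===== PRECONDITION & SPEC =====
def Spec_concat_position (pos_list : List (List (String × String))) (container_list : List (String × String)) (message : String) (out : String) : Prop := out = concat_position_alt pos_list container_list message
instance (pos_list : List (List (String × String))) (container_list : List (String × String)) (message : String) (out : String) : Decidable (Spec_concat_position pos_list container_list message out) := by unfold Spec_concat_position; infer_instance

-- ===== CLAIM (what is proved, stated in full; the proofs are below) =====
def Claim_equal_concat_position : Prop := ∀ (pos_list : List (List (String × String))) (container_list : List (String × String)) (message : String), Dom_concat_position pos_list container_list message → Spec_concat_position pos_list container_list message (concat_position pos_list container_list message)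

-- ===== LEMMAS AND PROOFS =====

-- proof-side intermediate form: the flat body lists of the three segments and a sequential renderer
def bBodies1 : Int → List (List (String × String)) → List String
  | _, [] => []
  | i, item :: rest =>
    ("DEF POS P" ++ PySem.Int.toStr (i + 1)) ::
    ("P" ++ PySem.Int.toStr (i + 1) ++ "=" ++ pvFmt (pvGet item "location") ++ "(0,0)") ::
    bBodies1 (i + 1) rest

def bBodies2 (container_list : List (String × String)) (n : Int) : Int → List (Option String) → List String
  | _, [] => []
  | j, c :: rest =>
    ("DEF POS P" ++ PySem.Int.toStr (n + j + 1)) ::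
    ("P" ++ PySem.Int.toStr (n + j + 1) ++ "=" ++ pvFmt (pvGetK container_list c) ++ "(0,0)") ::
    bBodies2 container_list n (j + 1) rest

def bBodies3 (n m : Int) : Int → List (Option String) → List String
  | _, [] => []
  | j, _ :: rest =>
    ("DEF INTE M" ++ PySem.Int.toStr (n + m - 1 + j)) ::
    ("M" ++ PySem.Int.toStr (n + m - 1 + j) ++ "=0") ::
    bBodies3 n m (j + 1) rest

def bRender : Int → String → List String → String
  | _, out, [] => out
  | k, out, b :: bs =>
    bRender (k + 1) (out ++ ("1;1;EDATA" ++ PySem.Int.toStr (10 * (k + 1)) ++ " " ++ b ++ "\r\n")) bs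

-- the same line sequence built front-to-back without an accumulator
def jl : Int → List String → String
  | _, [] => ""
  | k, b :: bs => ("1;1;EDATA" ++ PySem.Int.toStr (10 * (k + 1)) ++ " " ++ b ++ "\r\n") ++ jl (k + 1) bs

-- literal-merging simp lemmas: " " + body = the A-side literal with a leading space
theorem pvSp1 (x : String) : " " ++ ("DEF POS P" ++ x) = " DEF POS P" ++ x := by
  rw [← String.append_assoc]; rfl
theorem pvSp2 (x : String) : " " ++ ("P" ++ x) = " P" ++ x := by
  rw [← String.append_assoc]; rfl
theorem pvSp3 (x : String) : " " ++ ("DEF INTE M" ++ x) = " DEF INTE M" ++ x := by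
  rw [← String.append_assoc]; rfl
theorem pvSp4 (x : String) : " " ++ ("M" ++ x) = " M" ++ x := by
  rw [← String.append_assoc]; rfl

theorem bRender_append (ys : List String) :
    ∀ (xs : List String) (k : Int) (out : String),
    bRender k out (xs ++ ys) = bRender (k + xs.length) (bRender k out xs) ys := by
  intro xs
  induction xs with
  | nil => intro k out; simp [bRender]
  | cons x xs ih =>
      intro k out
      simp only [List.cons_append, bRender, ih, List.length_cons]
      congr 1
      push_cast; ring

theorem bBodies1_length (items : List (List (String × String))) :
    ∀ i, (bBodies1 i items).length = 2 * items.length := by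
  induction items with
  | nil => intro i; simp [bBodies1]
  | cons x xs ih => intro i; simp [bBodies1, ih]; ring

theorem bBodies2_length (cl : List (String × String)) (n : Int) (cs : List (Option String)) :
    ∀ j, (bBodies2 cl n j cs).length = 2 * cs.length := by
  induction cs with
  | nil => intro j; simp [bBodies2]
  | cons x xs ih => intro j; simp [bBodies2, ih]; ring

theorem aLoop1_eq (items : List (List (String × String))) :
    ∀ (i : Int) (cs : List (Option String)) (msg : String) (p : Int),
    aLoop1 items i cs msg p =
      (items.foldl (fun acc item =>
          if acc.contains (pvGet item "container") then acc
          else acc ++ [pvGet item "container"]) cs,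
       bRender (2 * i) msg (bBodies1 i items),
       if items.isEmpty then p else i + items.length) := by
  induction items with
  | nil => intro i cs msg p; simp [aLoop1, bBodies1, bRender]
  | cons item rest ih =>
      intro i cs msg p
      show aLoop1 rest (i + 1) _ _ (i + 1) = _
      rw [ih]
      have e1 : (10 * (2 * i + 1) : Int) = 10 * (i * 2 + 1) := by ring
      have e2 : (10 * (2 * i + 1 + 1) : Int) = 10 * (i * 2 + 2) := by ring
      have e3 : (2 * (i + 1) : Int) = 2 * i + 1 + 1 := by ring
      simp only [bBodies1, bRender, List.foldl_cons, List.isEmpty_cons, e1, e2, e3,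
        String.append_assoc, pvSp1, pvSp2, List.length_cons, Prod.mk.injEq]
      rcases rest with _ | ⟨r, rs⟩
      · simp
      · simp only [List.isEmpty_cons, Bool.false_eq_true, if_false, List.length_cons]
        refine ⟨?_, ?_, ?_⟩ <;> first | trivial | (push_cast; omega)

theorem aLoop2_eq (cl : List (String × String)) (n : Int) (cs : List (Option String)) :
    ∀ (j : Int) (msg : String),
    aLoop2 cl cs msg (n + j) =
      (bRender (2 * (n + j)) msg (bBodies2 cl n j cs), n + j + cs.length) := by
  induction cs with
  | nil => intro j msg; simp [aLoop2, bBodies2, bRender]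
  | cons c rest ih =>
      intro j msg
      show aLoop2 cl rest _ (n + j + 1) = _
      have e0 : (n + j + 1 : Int) = n + (j + 1) := by ring
      rw [e0, ih]
      have e1 : (10 * (2 * (n + j) + 1) : Int) = 10 * ((n + j) * 2 + 1) := by ring
      have e2 : (10 * (2 * (n + j) + 1 + 1) : Int) = 10 * ((n + j) * 2 + 2) := by ring
      have e3 : (2 * (n + (j + 1)) : Int) = 2 * (n + j) + 1 + 1 := by ring
      simp only [bBodies2, bRender, e1, e2, e3, String.append_assoc, pvSp1, pvSp2,
        List.length_cons, Prod.mk.injEq]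
      simp only [show (n + (j + 1) : Int) = n + j + 1 from by ring]
      exact ⟨trivial, by push_cast; omega⟩

theorem aLoop3_eq (cl : List (String × String)) (n m : Int) (cs : List (Option String)) :
    ∀ (j : Int) (msg : String),
    aLoop3 cl cs msg (n + m + j) =
      (bRender (2 * (n + m + j)) msg (bBodies3 n m j cs), n + m + j + cs.length) := by
  induction cs with
  | nil => intro j msg; simp [aLoop3, bBodies3, bRender]
  | cons c rest ih =>
      intro j msg
      show aLoop3 cl rest _ (n + m + j - 1 + 2) = _
      have e0 : (n + m + j - 1 + 2 : Int) = n + m + (j + 1) := by ring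
      rw [e0, ih]
      have e1 : (10 * (2 * (n + m + j) + 1) : Int) = 10 * ((n + m + j) * 2 + 1) := by ring
      have e2 : (10 * (2 * (n + m + j) + 1 + 1) : Int) = 10 * ((n + m + j) * 2 + 2) := by ring
      have e3 : (2 * (n + m + (j + 1)) : Int) = 2 * (n + m + j) + 1 + 1 := by ring
      have e4 : (n + m - 1 + j : Int) = n + m + j - 1 := by ring
      simp only [bBodies3, bRender, e1, e2, e3, e4, String.append_assoc, pvSp3, pvSp4,
        List.length_cons, Prod.mk.injEq]
      exact ⟨trivial, by push_cast; omega⟩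

-- A's incremental contains/append dedup is B's ordered-set fold
theorem containersA_eq_containersB (items : List (List (String × String))) :
    items.foldl (fun acc item =>
        if acc.contains (pvGet item "container") then acc
        else acc ++ [pvGet item "container"]) [] =
      items.foldl (fun s item => PySem.Set.add s (pvGet item "container")) [] := by
  have : (fun (acc : List (Option String)) item =>
      if acc.contains (pvGet item "container") then acc
      else acc ++ [pvGet item "container"]) =
      (fun (s : List (Option String)) item => PySem.Set.add s (pvGet item "container")) := by
    funext acc item; simp [PySem.Set.add]
  rw [this]

-- joining lines equals the accumulator renderer
theorem join_empty_nil : PySem.Str.join "" ([] : List String) = "" := by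
  simp [PySem.Str.join, PySem.Chars.join, List.intercalate, String.ofList]
  rfl

theorem join_empty_cons (x : String) (xs : List String) :
    PySem.Str.join "" (x :: xs) = x ++ PySem.Str.join "" xs := by
  cases xs with
  | nil =>
    have h1 : PySem.Str.join "" [x] = x := by
      simp [PySem.Str.join, PySem.Chars.join, List.intercalate]
    rw [h1, join_empty_nil]
    exact String.append_empty.symm
  | cons y ys => simp [PySem.Str.join, PySem.Chars.join_cons_cons]

theorem bRender_eq_jl (bs : List String) :
    ∀ (k : Int) (out : String), bRender k out bs = out ++ jl k bs := by
  induction bs with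
  | nil => intro k out; simp [bRender, jl]
  | cons b bs ih =>
      intro k out
      simp only [bRender, jl, ih, String.append_assoc]


theorem join_empty_append (xs ys : List String) :
    PySem.Str.join "" (xs ++ ys) = PySem.Str.join "" xs ++ PySem.Str.join "" ys := by
  induction xs with
  | nil => simp [join_empty_nil]
  | cons x xs ih => simp only [List.cons_append, join_empty_cons, ih, String.append_assoc]

theorem seg1 (p : List (List (String × String))) (cs : List (Option String))
    (cl : List (String × String)) :
    ∀ (items : List (List (String × String))) (i : Nat), p.drop i = items →
    PySem.Str.join ""
        ((PySem.List.pyRange (2 * (i : Int)) (2 * (i : Int) + 2 * (items.length : Int)) 1).map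
          (bLine p cs cl (p.length : Int) (cs.length : Int))) =
      jl (2 * (i : Int)) (bBodies1 (i : Int) items) := by
  intro items
  induction items with
  | nil =>
      intro i h
      rw [show (2 * (i:Int) + 2 * ((([]:List (List (String × String))).length : Nat) : Int)) = 2 * (i:Int) from by simp]
      rw [PySem.List.pyRange_one_eq_nil (le_refl _)]
      simp [join_empty_nil, jl, bBodies1]
  | cons item rest ih =>
      intro i h
      have hi : i < p.length := by
        by_contra hle
        rw [List.drop_eq_nil_of_le (by omega)] at h
        cases h
      have h0 : p[i]? = some item := by
        have h2 : (p.drop i)[0]? = some item := by rw [h]; rfl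
        rw [List.getElem?_drop] at h2
        simpa using h2
      have hget : p.getD i ([] : List (String × String)) = item := by
        simp [List.getD, h0]
      rw [PySem.List.pyRange_one_cons (by push_cast [List.length_cons]; omega)]
      rw [PySem.List.pyRange_one_cons (by push_cast [List.length_cons]; omega)]
      simp only [List.map_cons]
      rw [join_empty_cons, join_empty_cons]
      have hd0 : PySem.Int.floordiv (2 * (i : Int)) 2 = (i : Int) := by
        rw [PySem.Int.floordiv_eq_ediv_of_pos (by omega)]; omega
      have hm0 : PySem.Int.mod (2 * (i : Int)) 2 = 0 := by
        rw [PySem.Int.mod_eq_emod_of_pos (by omega)]; omega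
      have hd1 : PySem.Int.floordiv (2 * (i : Int) + 1) 2 = (i : Int) := by
        rw [PySem.Int.floordiv_eq_ediv_of_pos (by omega)]; omega
      have hm1 : PySem.Int.mod (2 * (i : Int) + 1) 2 = 1 := by
        rw [PySem.Int.mod_eq_emod_of_pos (by omega)]; omega
      have hlt : ((i : Int) < (p.length : Int)) := by exact_mod_cast hi
      simp only [bLine, hd0, hm0, hd1, hm1, if_pos hlt, one_ne_zero, if_false,
        PySem.List.pyGetD_natCast, hget]
      simp only [bBodies1, jl]
      have hrest : p.drop (i + 1) = rest := by
        have h2 := congrArg (List.drop 1) h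
        simpa [List.drop_drop, Nat.add_comm] using h2
      have hih := ih (i + 1) hrest
      rw [show ((2 * (i : Int) + 1 + 1) : Int) = 2 * (((i + 1 : Nat)) : Int) from by push_cast; ring,
          show (2 * (i : Int) + 2 * (((item :: rest).length : Nat) : Int) : Int) =
            2 * (((i + 1 : Nat)) : Int) + 2 * ((rest.length : Nat) : Int) from by push_cast [List.length_cons]; ring,
          hih]
      rw [show (((i + 1 : Nat)) : Int) = (i : Int) + 1 from by push_cast; ring]
      simp [String.append_assoc]

theorem seg2 (p : List (List (String × String))) (cs : List (Option String))
    (cl : List (String × String)) :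
    ∀ (suffix : List (Option String)) (j : Nat), cs.drop j = suffix →
    PySem.Str.join ""
        ((PySem.List.pyRange (2 * ((p.length : Int) + (j : Int)))
            (2 * ((p.length : Int) + (j : Int)) + 2 * (suffix.length : Int)) 1).map
          (bLine p cs cl (p.length : Int) (cs.length : Int))) =
      jl (2 * ((p.length : Int) + (j : Int))) (bBodies2 cl (p.length : Int) (j : Int) suffix) := by
  intro suffix
  induction suffix with
  | nil =>
      intro j h
      rw [show (2 * ((p.length : Int) + (j : Int)) + 2 * ((([]:List (Option String)).length : Nat) : Int)) = 2 * ((p.length : Int) + (j : Int)) from by simp]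
      rw [PySem.List.pyRange_one_eq_nil (le_refl _)]
      simp [join_empty_nil, jl, bBodies2]
  | cons c rest ih =>
      intro j h
      have hj : j < cs.length := by
        by_contra hle
        rw [List.drop_eq_nil_of_le (by omega)] at h
        cases h
      have h0 : cs[j]? = some c := by
        have h2 : (cs.drop j)[0]? = some c := by rw [h]; rfl
        rw [List.getElem?_drop] at h2
        simpa using h2
      have hget : cs.getD j (none : Option String) = c := by
        simp [List.getD, h0]
      rw [PySem.List.pyRange_one_cons (by push_cast [List.length_cons]; omega)]
      rw [PySem.List.pyRange_one_cons (by push_cast [List.length_cons]; omega)]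
      simp only [List.map_cons]
      rw [join_empty_cons, join_empty_cons]
      have hd0 : PySem.Int.floordiv (2 * ((p.length : Int) + (j : Int))) 2 = (p.length : Int) + (j : Int) := by
        rw [PySem.Int.floordiv_eq_ediv_of_pos (by omega)]; omega
      have hm0 : PySem.Int.mod (2 * ((p.length : Int) + (j : Int))) 2 = 0 := by
        rw [PySem.Int.mod_eq_emod_of_pos (by omega)]; omega
      have hd1 : PySem.Int.floordiv (2 * ((p.length : Int) + (j : Int)) + 1) 2 = (p.length : Int) + (j : Int) := by
        rw [PySem.Int.floordiv_eq_ediv_of_pos (by omega)]; omega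
      have hm1 : PySem.Int.mod (2 * ((p.length : Int) + (j : Int)) + 1) 2 = 1 := by
        rw [PySem.Int.mod_eq_emod_of_pos (by omega)]; omega
      have hnot : ¬ ((p.length : Int) + (j : Int) < (p.length : Int)) := by omega
      have hlt2 : (p.length : Int) + (j : Int) < (p.length : Int) + (cs.length : Int) := by
        have : (j : Int) < (cs.length : Int) := by exact_mod_cast hj
        omega
      simp only [bLine, hd0, hm0, hd1, hm1, if_neg hnot, if_pos hlt2, one_ne_zero, if_false,
        show ((p.length : Int) + (j : Int) - (p.length : Int)) = ((j : Nat) : Int) from by ring,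
        PySem.List.pyGetD_natCast, hget]
      simp only [bBodies2, jl]
      have hrest : cs.drop (j + 1) = rest := by
        have h2 := congrArg (List.drop 1) h
        simpa [List.drop_drop, Nat.add_comm] using h2
      have hih := ih (j + 1) hrest
      rw [show ((2 * ((p.length : Int) + (j : Int)) + 1 + 1) : Int) = 2 * ((p.length : Int) + (((j + 1 : Nat)) : Int)) from by push_cast; ring,
          show (2 * ((p.length : Int) + (j : Int)) + 2 * (((c :: rest).length : Nat) : Int) : Int) =
            2 * ((p.length : Int) + (((j + 1 : Nat)) : Int)) + 2 * ((rest.length : Nat) : Int) from by push_cast [List.length_cons]; ring,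
          hih]
      rw [show (((j + 1 : Nat)) : Int) = (j : Int) + 1 from by push_cast; ring]
      simp [String.append_assoc]

theorem seg3 (p : List (List (String × String))) (cs : List (Option String))
    (cl : List (String × String)) :
    ∀ (suffix : List (Option String)) (j : Nat),
    PySem.Str.join ""
        ((PySem.List.pyRange (2 * ((p.length : Int) + (cs.length : Int) + (j : Int)))
            (2 * ((p.length : Int) + (cs.length : Int) + (j : Int)) + 2 * (suffix.length : Int)) 1).map
          (bLine p cs cl (p.length : Int) (cs.length : Int))) =
      jl (2 * ((p.length : Int) + (cs.length : Int) + (j : Int)))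
        (bBodies3 (p.length : Int) (cs.length : Int) (j : Int) suffix) := by
  intro suffix
  induction suffix with
  | nil =>
      intro j
      rw [show (2 * ((p.length : Int) + (cs.length : Int) + (j : Int)) + 2 * ((([]:List (Option String)).length : Nat) : Int)) = 2 * ((p.length : Int) + (cs.length : Int) + (j : Int)) from by simp]
      rw [PySem.List.pyRange_one_eq_nil (le_refl _)]
      simp [join_empty_nil, jl, bBodies3]
  | cons c rest ih =>
      intro j
      rw [PySem.List.pyRange_one_cons (by push_cast [List.length_cons]; omega)]
      rw [PySem.List.pyRange_one_cons (by push_cast [List.length_cons]; omega)]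
      simp only [List.map_cons]
      rw [join_empty_cons, join_empty_cons]
      have hd0 : PySem.Int.floordiv (2 * ((p.length : Int) + (cs.length : Int) + (j : Int))) 2 = (p.length : Int) + (cs.length : Int) + (j : Int) := by
        rw [PySem.Int.floordiv_eq_ediv_of_pos (by omega)]; omega
      have hm0 : PySem.Int.mod (2 * ((p.length : Int) + (cs.length : Int) + (j : Int))) 2 = 0 := by
        rw [PySem.Int.mod_eq_emod_of_pos (by omega)]; omega
      have hd1 : PySem.Int.floordiv (2 * ((p.length : Int) + (cs.length : Int) + (j : Int)) + 1) 2 = (p.length : Int) + (cs.length : Int) + (j : Int) := by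
        rw [PySem.Int.floordiv_eq_ediv_of_pos (by omega)]; omega
      have hm1 : PySem.Int.mod (2 * ((p.length : Int) + (cs.length : Int) + (j : Int)) + 1) 2 = 1 := by
        rw [PySem.Int.mod_eq_emod_of_pos (by omega)]; omega
      have hnot1 : ¬ ((p.length : Int) + (cs.length : Int) + (j : Int) < (p.length : Int)) := by omega
      have hnot2 : ¬ ((p.length : Int) + (cs.length : Int) + (j : Int) < (p.length : Int) + (cs.length : Int)) := by omega
      simp only [bLine, hd0, hm0, hd1, hm1, if_neg hnot1, if_neg hnot2, one_ne_zero, if_false,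
        show ((p.length : Int) + (cs.length : Int) + (j : Int) - (p.length : Int) - (cs.length : Int)) = ((j : Nat) : Int) from by ring]
      simp only [bBodies3, jl]
      have hih := ih (j + 1)
      rw [show ((2 * ((p.length : Int) + (cs.length : Int) + (j : Int)) + 1 + 1) : Int) = 2 * ((p.length : Int) + (cs.length : Int) + (((j + 1 : Nat)) : Int)) from by push_cast; ring,
          show (2 * ((p.length : Int) + (cs.length : Int) + (j : Int)) + 2 * (((c :: rest).length : Nat) : Int) : Int) =
            2 * ((p.length : Int) + (cs.length : Int) + (((j + 1 : Nat)) : Int)) + 2 * ((rest.length : Nat) : Int) from by push_cast [List.length_cons]; ring,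
          hih]
      rw [show (((j + 1 : Nat)) : Int) = (j : Int) + 1 from by push_cast; ring]
      simp [String.append_assoc]


-- B equals the flat renderer over the three body segments
theorem alt_eq_flat (p : List (List (String × String))) (cl : List (String × String)) (msg : String) :
    concat_position_alt p cl msg =
      bRender 0 msg
        (bBodies1 0 p ++
          bBodies2 cl (p.length : Int) 0 (p.foldl (fun s item => PySem.Set.add s (pvGet item "container")) []) ++
          bBodies3 (p.length : Int) ((p.foldl (fun s item => PySem.Set.add s (pvGet item "container")) []).length : Int) 0
            (p.foldl (fun s item => PySem.Set.add s (pvGet item "container")) [])) := by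
  unfold concat_position_alt
  dsimp only
  set cs := p.foldl (fun s item => PySem.Set.add s (pvGet item "container")) [] with hcs
  set n : Int := (p.length : Int) with hn
  set m : Int := (cs.length : Int) with hm
  have hn0 : 0 ≤ n := by simp [hn]
  have hm0 : 0 ≤ m := by simp [hm]
  rw [PySem.List.pyRange_one_append 0 (2 * n) (2 * (n + 2 * m)) (by omega) (by omega),
      PySem.List.pyRange_one_append (2 * n) (2 * n + 2 * m) (2 * (n + 2 * m)) (by omega) (by omega)]
  simp only [List.map_append, join_empty_append]
  have h1 := seg1 p cs cl p 0 (by simp)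
  have h2 := seg2 p cs cl cs 0 (by simp)
  have h3 := seg3 p cs cl cs 0
  simp only [Nat.cast_zero, mul_zero, add_zero, zero_add] at h1 h2 h3
  rw [← hn, ← hm] at h1 h2 h3
  rw [show ((2*(n+m)+2*m : Int)) = 2*(n+2*m) from by ring, show ((2*(n+m) : Int)) = 2*n+2*m from by ring] at h3
  rw [h1, h2, h3]
  rw [bRender_append, bRender_append, bRender_eq_jl, bRender_eq_jl, bRender_eq_jl]
  simp only [List.length_append, bBodies1_length, bBodies2_length]
  rw [show ((0:Int) + ((2 * p.length : Nat) : Int)) = 2 * n from by push_cast [hn]; ring]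
  rw [show ((0:Int) + ((2 * p.length + 2 * cs.length : Nat) : Int)) = 2 * n + 2 * m from by push_cast [hn, hm]; ring]
  simp [String.append_assoc]

-- A equals the same flat renderer
theorem A_eq_flat (p : List (List (String × String))) (cl : List (String × String)) (msg : String) :
    concat_position p cl msg =
      bRender 0 msg
        (bBodies1 0 p ++
          bBodies2 cl (p.length : Int) 0 (p.foldl (fun s item => PySem.Set.add s (pvGet item "container")) []) ++
          bBodies3 (p.length : Int) ((p.foldl (fun s item => PySem.Set.add s (pvGet item "container")) []).length : Int) 0
            (p.foldl (fun s item => PySem.Set.add s (pvGet item "container")) [])) := by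
  unfold concat_position
  dsimp only
  rw [aLoop1_eq, containersA_eq_containersB]
  dsimp only
  rcases p with _ | ⟨it, its⟩
  · simp [aLoop2, aLoop3, bRender, bBodies1, bBodies2, bBodies3]
  · rw [show (if (it :: its).isEmpty = true then (0:Int) else 0 + ((it :: its).length : Int)) =
        ((it :: its).length : Int) + 0 from by simp]
    rw [aLoop2_eq]
    dsimp only
    rw [show ((it :: its).length : Int) + 0 +
          (((it :: its).foldl (fun s item => PySem.Set.add s (pvGet item "container")) []).length : Int) =
        ((it :: its).length : Int) +
          (((it :: its).foldl (fun s item => PySem.Set.add s (pvGet item "container")) []).length : Int) + 0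
      from by ring]
    rw [aLoop3_eq]
    dsimp only
    rw [bRender_append, bRender_append, List.length_append, bBodies1_length, bBodies2_length]
    rw [show (2 * ((0:Int)) : Int) = 0 from by ring]
    rw [show (2 * (((it :: its).length : Int) + 0) : Int) =
        0 + ((2 * (it :: its).length : Nat) : Int) from by push_cast; ring]
    rw [show (2 * (((it :: its).length : Int) +
          (((it :: its).foldl (fun s item => PySem.Set.add s (pvGet item "container")) []).length : Int) + 0) : Int) =
        0 + ((2 * (it :: its).length +
          2 * ((it :: its).foldl (fun s item => PySem.Set.add s (pvGet item "container")) []).length : Nat) : Int)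
      from by push_cast; ring]

-- ===== VERDICT (by name: the statement is the Claim_ definition above) =====
theorem concat_position_spec : Claim_equal_concat_position := by
  intro p cl msg _hdom
  unfold Spec_concat_position
  rw [A_eq_flat, alt_eq_flat]
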